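-- pv_equiv track=rewrite | github.com/siddartha-10/programming-for-ML-assignments | HW5/hw5.py | join_new
-- ===== SOURCE A (Python) =====
-- def join_new(terms):
--     str = ''
--     for i in range(0, len(terms)):
--         if(i == 0):
--             str += terms[i]
--         else:
--             if(terms[i][0] == '-'):
--                 str +=  terms[i]
--             else:
--                 str += '+' + terms[i]
--     return str
-- ===== SOURCE B (Python) =====
-- def join_new(terms):
--     if not terms:
--         return ''
--     def build(lo, hi):
--         # join terms[lo:hi] (hi > lo) by divide and conquer
--         if hi - lo == 1:
--             return terms[lo]
--         mid = (lo + hi) // 2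
--         sep = '' if terms[mid][0] == '-' else '+'
--         return build(lo, mid) + sep + build(mid, hi)
--     return build(0, len(terms))
-- ===== Notes on version B (the rewrite author's own statement) =====
-- stated objective: alternative
-- what changed: Replaces A's single left-to-right conditional-append loop by a divide-and-conquer recursion that builds each half independently and inserts the separator chosen by the middle term's first character.
import Mathlib
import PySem

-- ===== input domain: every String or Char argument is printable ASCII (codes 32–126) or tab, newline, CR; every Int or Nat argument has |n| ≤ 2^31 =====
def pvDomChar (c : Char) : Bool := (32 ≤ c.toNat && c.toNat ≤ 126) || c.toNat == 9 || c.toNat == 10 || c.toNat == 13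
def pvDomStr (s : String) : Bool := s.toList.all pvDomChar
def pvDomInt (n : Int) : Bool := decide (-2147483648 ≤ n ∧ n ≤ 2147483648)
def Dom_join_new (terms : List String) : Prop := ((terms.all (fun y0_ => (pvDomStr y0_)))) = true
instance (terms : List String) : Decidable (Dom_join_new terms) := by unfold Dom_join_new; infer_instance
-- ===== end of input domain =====

-- B replaces A's left-to-right conditional-append loop by a divide-and-conquer recursion (alternative, not faster).

-- ===== PORT A =====
def join_new (terms : List String) : String :=
  (PySem.List.pyRange 0 (PySem.List.len terms)).foldl
    (fun s i =>
      if i = 0 then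
        s ++ PySem.List.pyGetD terms i ""
      else
        if PySem.Str.pyGet? (PySem.List.pyGetD terms i "") 0 = some '-' then
          s ++ PySem.List.pyGetD terms i ""
        else
          s ++ ("+" ++ PySem.List.pyGetD terms i ""))
    ""

-- ===== PORT B =====
-- B's recursive helper `build(lo, hi)`. Indices are nonnegative, so Nat with `/ 2` is exact
-- for Python's `(lo + hi) // 2`; the base case `hi ≤ lo + 1` instead of `hi - lo == 1` only
-- makes the recursion total (B never calls build with hi ≤ lo).
def buildB (terms : List String) (lo hi : Nat) : String :=
  if hi ≤ lo + 1 then terms.getD lo ""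
  else
    let mid := (lo + hi) / 2
    buildB terms lo mid ++
      (if PySem.Str.pyGet? (terms.getD mid "") 0 = some '-' then "" else "+") ++
      buildB terms mid hi
termination_by hi - lo
decreasing_by all_goals omega

def join_new_alt (terms : List String) : String :=
  if terms = [] then "" else buildB terms 0 terms.length

-- ===== PRECONDITION & SPEC =====
-- Pre_ excludes exactly the inputs on which the Python A raises IndexError (an empty non-first
-- term makes terms[i][0] fail); B's Python raises there too.
def Pre_join_new (terms : List String) : Prop := ∀ t ∈ terms.tail, t ≠ ""
instance (terms : List String) : Decidable (Pre_join_new terms) := by unfold Pre_join_new; infer_instance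
def pvWitness_join_new : List String := ["x^2", "-3x", "5"]

def Spec_join_new (terms : List String) (out : String) : Prop := out = join_new_alt terms
instance (terms : List String) (out : String) : Decidable (Spec_join_new terms out) := by unfold Spec_join_new; infer_instance

-- ===== CLAIM (what is proved, stated in full; the proofs are below) =====
def Claim_equal_join_new : Prop := ∀ (terms : List String), Dom_join_new terms → Pre_join_new terms → Spec_join_new terms (join_new terms)

-- ===== LEMMAS AND PROOFS =====

-- separator chosen by a term's first character (A's and B's common test)
def sepA (t : String) : String := if PySem.Str.pyGet? t 0 = some '-' then "" else "+"

-- the joined tail: each term prefixed by its separator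
def tailJoin : List String → String
  | [] => ""
  | x :: xs => sepA x ++ x ++ tailJoin xs

theorem tailJoin_append (xs ys : List String) :
    tailJoin (xs ++ ys) = tailJoin xs ++ tailJoin ys := by
  induction xs with
  | nil => simp [tailJoin]
  | cons x xs ih => simp [tailJoin, ih, String.append_assoc]

-- A's loop body equals appending sepA t ++ t
theorem stepA_eq (s t : String) :
    (if PySem.Str.pyGet? t 0 = some '-' then s ++ t else s ++ ("+" ++ t)) =
      s ++ (sepA t ++ t) := by
  unfold sepA
  split_ifs <;> simp

-- A's tail fold equals acc ++ tailJoin rest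
theorem foldA_eq (rest : List String) (acc : String) :
    rest.foldl
      (fun s t => if PySem.Str.pyGet? t 0 = some '-' then s ++ t else s ++ ("+" ++ t)) acc =
    acc ++ tailJoin rest := by
  induction rest generalizing acc with
  | nil => simp [tailJoin]
  | cons x xs ih =>
    simp only [List.foldl_cons, tailJoin]
    rw [stepA_eq, ih, String.append_assoc]

-- splitting the tail slice at mid
theorem slice_split (terms : List String) (lo mid hi : Nat)
    (h1 : lo + 1 ≤ mid) (h2 : mid < hi) (h3 : hi ≤ terms.length) :
    (terms.drop (lo+1)).take (hi - lo - 1) =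
      (terms.drop (lo+1)).take (mid - lo - 1) ++
        terms.getD mid "" :: (terms.drop (mid+1)).take (hi - mid - 1) := by
  have hm : mid < terms.length := lt_of_lt_of_le h2 h3
  have hsum : hi - lo - 1 = (mid - lo - 1) + (hi - mid) := by omega
  rw [hsum, List.take_add, List.drop_drop]
  rw [show lo + 1 + (mid - lo - 1) = mid from by omega]
  rw [List.drop_eq_getElem_cons hm]
  have hge : terms[mid] = terms.getD mid "" := (List.getD_eq_getElem terms "" hm).symm
  have ht : hi - mid = (hi - mid - 1) + 1 := by omega
  rw [hge, ht, List.take_succ_cons]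
  simp

-- core lemma: buildB computes head ++ tailJoin of its slice
theorem buildB_eq (terms : List String) :
    ∀ n lo hi, hi - lo = n → lo < hi → hi ≤ terms.length →
      buildB terms lo hi =
        terms.getD lo "" ++ tailJoin ((terms.drop (lo+1)).take (hi - lo - 1)) := by
  intro n
  induction n using Nat.strong_induction_on with
  | _ n ih =>
    intro lo hi hn hlt hle
    unfold buildB
    by_cases hb : hi ≤ lo + 1
    · have : hi - lo - 1 = 0 := by omega
      simp [hb, this, tailJoin]
    · simp only [if_neg hb]
      have hmid1 : lo + 1 ≤ (lo + hi) / 2 := by omega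
      have hmid2 : (lo + hi) / 2 < hi := by omega
      rw [ih ((lo + hi) / 2 - lo) (by omega) lo ((lo + hi) / 2) rfl (by omega) (by omega),
          ih (hi - (lo + hi) / 2) (by omega) ((lo + hi) / 2) hi rfl (by omega) hle,
          slice_split terms lo ((lo + hi) / 2) hi hmid1 hmid2 hle,
          tailJoin_append]
      simp only [tailJoin, sepA]
      simp [String.append_assoc]

-- ===== VERDICT (by name: the statement is the Claim_ definition above) =====
theorem join_new_spec : Claim_equal_join_new := by
  intro terms _ _
  unfold Spec_join_new join_new join_new_alt
  cases terms with
  | nil => decide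
  | cons t0 rest =>
    -- A side: peel off index 0, then reduce the range fold to a fold over the tail
    rw [PySem.List.pyRange_one_cons (show (0:Int) < PySem.List.len (t0::rest) by simp)]
    rw [show ((0:Int) + 1) = 1 by norm_num]
    simp only [List.foldl_cons]
    rw [PySem.List.foldl_congr_mem (PySem.List.pyRange 1 (PySem.List.len (t0::rest))) _
        (fun s i => (fun (s t : String) =>
            if PySem.Str.pyGet? t 0 = some '-' then s ++ t else s ++ ("+" ++ t)) s
          (PySem.List.pyGetD (t0::rest) i "")) _
        (by
          intro acc i hi
          have hm := (PySem.List.mem_pyRange_one).1 hi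
          have hne : i ≠ 0 := by omega
          simp only [if_neg hne])]
    rw [PySem.List.foldl_pyRange_pyGetD (t0::rest) ""
        (fun (s t : String) =>
          if PySem.Str.pyGet? t 0 = some '-' then s ++ t else s ++ ("+" ++ t))
        _ (by norm_num : (0:Int) ≤ 1)]
    simp only [if_true, Int.toNat_one, List.drop_succ_cons, List.drop_zero,
      PySem.List.pyGetD_zero_cons, String.empty_append,
      if_neg (List.cons_ne_nil t0 rest)]
    rw [foldA_eq]
    -- B side
    rw [buildB_eq (t0::rest) ((t0::rest).length) 0 (t0::rest).length rfl (by simp) le_rfl]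
    simp
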